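-- pv_equiv track=rewrite | github.com/jparrott/AOC2018 | day2/day2b.py | mydif
-- ===== SOURCE A (Python) =====
-- def mydif(a, b):
--     pos = -1
--     for i, (c1,c2) in enumerate(zip(a,b)):
--         if c1 != c2:
--             if pos != -1:
--                 return -1
--             else:
--                 pos = i
--     return pos
-- ===== SOURCE B (Python) =====
-- def mydif(a, b):
--     # Two-ended scan: common-prefix length p and common-suffix length s of the
--     # truncated strings; a unique mismatch exists iff p + s == n - 1.
--     n = min(len(a), len(b))
--     x, y = a[:n], b[:n]
--     if x == y:
--         return -1
--     p = 0
--     while x[p] == y[p]: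
--         p += 1
--     s = 0
--     while x[n - 1 - s] == y[n - 1 - s]:
--         s += 1
--     return p if p + s == n - 1 else -1
-- ===== Notes on version B (the rewrite author's own statement) =====
-- stated objective: alternative
-- what changed: Replaces A's single zipped pass with a running pos accumulator and short-circuit on the second mismatch by a two-ended scan: compute the common-prefix length p and common-suffix length s of the truncated strings and decide arithmetically (unique mismatch iff p + s == n - 1), never enumerating mismatches at all.
import Mathlib
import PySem

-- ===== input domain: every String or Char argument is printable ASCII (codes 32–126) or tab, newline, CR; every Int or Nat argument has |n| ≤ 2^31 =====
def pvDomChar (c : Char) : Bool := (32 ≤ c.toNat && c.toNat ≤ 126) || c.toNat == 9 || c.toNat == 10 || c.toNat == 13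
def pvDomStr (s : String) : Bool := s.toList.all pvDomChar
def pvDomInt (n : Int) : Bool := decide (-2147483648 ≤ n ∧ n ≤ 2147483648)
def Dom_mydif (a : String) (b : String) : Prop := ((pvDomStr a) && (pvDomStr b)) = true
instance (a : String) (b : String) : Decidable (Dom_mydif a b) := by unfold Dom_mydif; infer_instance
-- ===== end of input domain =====

-- B replaces A's single zipped pass (running pos, short-circuit on a second mismatch) by a
-- two-ended scan: common-prefix length p and common-suffix length s of the truncated strings,
-- returning p iff p + s = n - 1; objective: alternative (same cost, different algorithm).

-- ===== PORT A =====
-- A's for-loop over enumerate(zip(a,b)) with state pos and the two early-return branches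
def mydifLoop : List (Int × (Char × Char)) → Int → Int
  | [], pos => pos
  | (i, (c1, c2)) :: rest, pos =>
      if c1 ≠ c2 then
        if pos ≠ -1 then -1 else mydifLoop rest i
      else mydifLoop rest pos

def mydif (a : String) (b : String) : Int :=
  mydifLoop (PySem.List.enumerate (a.toList.zip b.toList)) (-1)

-- ===== PORT B =====
-- the forward while-loop `while x[p] == y[p]: p += 1` as the structural recursion counting
-- leading equal characters; the backward loop is the same recursion on the reversed lists
def prefEq : List Char → List Char → Nat
  | c :: cs, d :: ds => if c = d then prefEq cs ds + 1 else 0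
  | _, _ => 0

-- n = min(len(a),len(b)); a[:n] is List.take n (exact: 0 ≤ n ≤ length)
def mydif_alt (a : String) (b : String) : Int :=
  let la := a.toList
  let lb := b.toList
  let n := min la.length lb.length
  let x := la.take n
  let y := lb.take n
  if x = y then -1
  else
    let p := prefEq x y
    let s := prefEq x.reverse y.reverse
    if (p : Int) + (s : Int) = (n : Int) - 1 then (p : Int) else -1

-- ===== PRECONDITION & SPEC =====
def Spec_mydif (a : String) (b : String) (out : Int) : Prop := out = mydif_alt a b
instance (a : String) (b : String) (out : Int) : Decidable (Spec_mydif a b out) := by unfold Spec_mydif; infer_instance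

-- ===== CLAIM (what is proved, stated in full; the proofs are below) =====
def Claim_equal_mydif : Prop := ∀ (a : String) (b : String), Dom_mydif a b → Spec_mydif a b (mydif a b)

-- ===== LEMMAS AND PROOFS =====

-- a zipped pair of equal characters
def eqb : Char × Char → Bool := fun p => p.1 == p.2

-- common-prefix length of a zipped list
def prefZ : List (Char × Char) → Nat
  | [] => 0
  | p :: r => if eqb p then prefZ r + 1 else 0

theorem prefEq_zip : ∀ (u v : List Char), prefEq u v = prefZ (u.zip v) := by
  intro u
  induction u with
  | nil => intro v; cases v <;> simp [prefEq, prefZ]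
  | cons c cs ih =>
      intro v
      cases v with
      | nil => simp [prefEq, prefZ]
      | cons d ds =>
          simp only [prefEq, List.zip_cons_cons, prefZ, eqb]
          by_cases h : c = d <;> simp [h, ih]

theorem zip_take_min : ∀ (u v : List Char),
    u.zip v = (u.take (min u.length v.length)).zip (v.take (min u.length v.length)) := by
  intro u
  induction u with
  | nil => intro v; simp
  | cons c cs ih =>
      intro v
      cases v with
      | nil => simp
      | cons d ds =>
          simp only [List.length_cons, Nat.succ_min_succ, List.take_succ_cons,
            List.zip_cons_cons]
          rw [← ih ds]

theorem eq_iff_zip_all : ∀ (u v : List Char), u.length = v.length →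
    (u = v ↔ (u.zip v).all eqb = true) := by
  intro u
  induction u with
  | nil => intro v hv; cases v <;> simp_all
  | cons c cs ih =>
      intro v hv
      cases v with
      | nil => simp_all
      | cons d ds =>
          simp only [List.length_cons, Nat.succ.injEq] at hv
          simp [eqb, ih ds hv]

theorem zip_reverse_eq : ∀ (u v : List Char), u.length = v.length →
    u.reverse.zip v.reverse = (u.zip v).reverse := by
  intro u
  induction u with
  | nil => intro v hv; cases v <;> simp_all
  | cons c cs ih =>
      intro v hv
      cases v with
      | nil => simp_all
      | cons d ds =>
          simp only [List.length_cons, Nat.succ.injEq] at hv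
          simp only [List.reverse_cons, List.zip_cons_cons]
          rw [List.zip_append (by simp [hv]), ih ds hv]
          simp

theorem prefZ_takeWhile : ∀ (l : List (Char × Char)), prefZ l = (l.takeWhile eqb).length := by
  intro l
  induction l with
  | nil => simp [prefZ]
  | cons p r ih =>
      by_cases h : eqb p = true <;> simp [prefZ, h, ih]

theorem prefZ_append_all : ∀ (u v : List (Char × Char)), (∀ p ∈ u, eqb p = true) →
    prefZ (u ++ v) = u.length + prefZ v := by
  intro u
  induction u with
  | nil => intro v _; simp
  | cons q r ih =>
      intro v h
      have hq : eqb q = true := h q (by simp)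
      simp only [List.cons_append, prefZ, hq, if_true,
        ih v (fun p hp => h p (by simp [hp])), List.length_cons]
      omega

theorem prefZ_ge_take : ∀ (l : List (Char × Char)) (m : Nat), m ≤ prefZ l →
    ∀ p ∈ l.take m, eqb p = true := by
  intro l
  induction l with
  | nil => intro m _ p hp; simp at hp
  | cons q r ih =>
      intro m hm p hp
      cases m with
      | zero => simp at hp
      | succ m' =>
          by_cases hq : eqb q = true
          · simp only [prefZ, hq, if_true] at hm
            simp only [List.take_succ_cons, List.mem_cons] at hp
            rcases hp with h | h
            · subst h; exact hq
            · exact ih m' (by omega) p h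
          · simp [prefZ, hq] at hm
  
theorem dropWhile_head_false : ∀ (l : List (Char × Char)) (c : Char × Char) (r : List (Char × Char)),
    l.dropWhile eqb = c :: r → eqb c = false := by
  intro l
  induction l with
  | nil => intro c r h; simp at h
  | cons q t ih =>
      intro c r h
      by_cases hq : eqb q = true
      · exact ih c r (by simpa [List.dropWhile_cons, hq] using h)
      · simp only [List.dropWhile_cons, hq] at h
        simp only [Bool.not_eq_true] at hq
        cases h
        simp_all
  
theorem loop_skip : ∀ (u : List (Char × Char)) (s : Int) (rest : List (Int × (Char × Char))) (pos : Int),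
    (∀ p ∈ u, eqb p = true) →
    mydifLoop (PySem.List.enumerate u s ++ rest) pos = mydifLoop rest pos := by
  intro u
  induction u with
  | nil => intro s rest pos _; simp [PySem.List.enumerate_nil]
  | cons q t ih =>
      intro s rest pos h
      obtain ⟨c1, c2⟩ := q
      have hq : c1 = c2 := by simpa [eqb] using h (c1, c2) (by simp)
      rw [PySem.List.enumerate_cons]
      simp only [List.cons_append, mydifLoop, hq, ne_eq, not_true_eq_false, if_false]
      exact ih (s + 1) rest pos (fun p hp => h p (by simp [hp]))

theorem enumFilterNil : ∀ (r : List (Char × Char)) (t : Int),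
    ((PySem.List.enumerate r t).filter (fun p => p.2.1 != p.2.2) = []) ↔ (∀ p ∈ r, eqb p = true) := by
  intro r
  induction r with
  | nil => intro t; simp [PySem.List.enumerate_nil]
  | cons q s ih =>
      intro t
      obtain ⟨c1, c2⟩ := q
      rw [PySem.List.enumerate_cons]
      by_cases h : c1 = c2
      · simp [h, eqb, ih (t + 1)]
      · simp [h, eqb]

-- once a mismatch index pos ≥ 0 is held, the loop returns pos iff no further mismatch exists
theorem mydifLoop_pos (l : List (Char × Char)) :
    ∀ (s pos : Int), 0 ≤ pos →
      mydifLoop (PySem.List.enumerate l s) pos =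
        if (PySem.List.enumerate l s).filter (fun p => p.2.1 != p.2.2) = [] then pos else -1 := by
  induction l with
  | nil => intro s pos _; simp [PySem.List.enumerate_nil, mydifLoop]
  | cons c rest ih =>
      intro s pos hpos
      obtain ⟨c1, c2⟩ := c
      rw [PySem.List.enumerate_cons]
      by_cases h : c1 = c2
      · have hfil : List.filter (fun p => p.2.1 != p.2.2) ((s, (c1, c2)) :: PySem.List.enumerate rest (s + 1))
            = List.filter (fun p => p.2.1 != p.2.2) (PySem.List.enumerate rest (s + 1)) := by
          simp [h]
        rw [hfil]
        simpa [mydifLoop, h] using ih (s + 1) pos hpos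
      · have hfil : List.filter (fun p => p.2.1 != p.2.2) ((s, (c1, c2)) :: PySem.List.enumerate rest (s + 1))
            = (s, (c1, c2)) :: List.filter (fun p => p.2.1 != p.2.2) (PySem.List.enumerate rest (s + 1)) := by
          simp [h]
        have hpos' : pos ≠ -1 := by omega
        rw [hfil]
        simp [mydifLoop, h, hpos']

-- A's loop characterised by the takeWhile/dropWhile split at the first mismatch
theorem A_char (l : List (Char × Char)) (s : Int) (hs : 0 ≤ s) :
    mydifLoop (PySem.List.enumerate l s) (-1) =
      (match l.dropWhile eqb with
       | [] => -1
       | _ :: r' => if r'.all eqb then s + ((l.takeWhile eqb).length : Int) else -1) := by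
  have hsplit : PySem.List.enumerate l s =
      PySem.List.enumerate (l.takeWhile eqb) s ++
        PySem.List.enumerate (l.dropWhile eqb) (s + ((l.takeWhile eqb).length : Int)) := by
    conv_lhs => rw [← List.takeWhile_append_dropWhile (p := eqb) (l := l)]
    rw [PySem.List.enumerate_append]
  rw [hsplit, loop_skip _ _ _ _ (fun p hp => List.mem_takeWhile_imp hp)]
  cases h : l.dropWhile eqb with
  | nil => simp [PySem.List.enumerate_nil, mydifLoop]
  | cons c r' =>
      have hc : eqb c = false := dropWhile_head_false l c r' h
      obtain ⟨c1, c2⟩ := c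
      have hc' : c1 ≠ c2 := by simpa [eqb] using hc
      rw [PySem.List.enumerate_cons]
      simp only [mydifLoop]
      rw [if_pos hc', if_neg (by simp : ¬((-1 : Int) ≠ -1))]
      have hpos : (0 : Int) ≤ s + ((l.takeWhile eqb).length : Int) := by positivity
      rw [mydifLoop_pos r' _ _ hpos]
      by_cases hall : r'.all eqb = true
      · rw [if_pos ((enumFilterNil r' _).mpr (by simpa [List.all_eq_true] using hall)), if_pos hall]
      · rw [if_neg (fun hnil => hall (by simpa [List.all_eq_true] using (enumFilterNil r' _).mp hnil)),
          if_neg hall]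

-- ===== VERDICT (by name: the statement is the Claim_ definition above) =====
theorem mydif_spec : Claim_equal_mydif := by
  intro a b _
  unfold Spec_mydif mydif mydif_alt
  simp only []
  set la := a.toList with hla
  set lb := b.toList with hlb
  set n := min la.length lb.length with hn
  set x := la.take n with hx
  set y := lb.take n with hy
  have hxlen : x.length = n := by simp [hx, hn]
  have hylen : y.length = n := by simp [hy, hn]
  have hxy : x.length = y.length := by rw [hxlen, hylen]
  have hzip : la.zip lb = x.zip y := zip_take_min la lb
  set l := x.zip y with hl
  have hlen : l.length = n := by simp [hl, List.length_zip, hxlen, hylen]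
  rw [hzip]
  rw [A_char l 0 le_rfl]
  by_cases hEq : x = y
  · have hall : ∀ p ∈ l, eqb p = true := by
      have := (eq_iff_zip_all x y hxy).mp hEq
      simpa [List.all_eq_true, hl] using this
    rw [List.dropWhile_eq_nil_iff.mpr hall]
    simp [hEq]
  · rw [if_neg hEq]
    cases h : l.dropWhile eqb with
    | nil =>
        exact absurd ((eq_iff_zip_all x y hxy).mpr
          (by simpa [List.all_eq_true, hl] using List.dropWhile_eq_nil_iff.mp h)) hEq
    | cons c r' =>
        have hc : eqb c = false := dropWhile_head_false l c r' h
        have hdecomp : l = l.takeWhile eqb ++ c :: r' := by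
          conv_lhs => rw [← List.takeWhile_append_dropWhile (p := eqb) (l := l)]
          rw [h]
        set t := l.takeWhile eqb with ht
        have hp : prefEq x y = t.length := by
          rw [prefEq_zip, ← hl, prefZ_takeWhile, ht]
        have hs : prefEq x.reverse y.reverse = prefZ l.reverse := by
          rw [prefEq_zip, zip_reverse_eq x y hxy, hl]
        have hcount : n = t.length + 1 + r'.length := by
          have hll : l.length = (t ++ c :: r').length := by rw [← hdecomp]
          rw [hlen] at hll; simp at hll; omega
        have hrev : l.reverse = r'.reverse ++ c :: t.reverse := by
          conv_lhs => rw [hdecomp]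
          simp
        have hiff : (prefZ l.reverse = r'.length) ↔ r'.all eqb = true := by
          constructor
          · intro he
            have := prefZ_ge_take l.reverse r'.length (le_of_eq he.symm)
            rw [hrev] at this
            have htk : (r'.reverse ++ c :: t.reverse).take r'.length = r'.reverse := by
              have : r'.length = r'.reverse.length := by simp
              rw [this, List.take_left]
            rw [htk] at this
            simp only [List.all_eq_true]
            intro p hp'
            exact this p (by simp [hp'])
          · intro hall
            rw [hrev, prefZ_append_all r'.reverse (c :: t.reverse)
              (fun p hp' => by
                simp only [List.all_eq_true] at hall
                exact hall p (List.mem_reverse.mp hp'))]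
            simp [prefZ, hc]
        have hred : (match (c :: r' : List (Char × Char)) with
            | [] => (-1 : Int)
            | _ :: r'' => if r''.all eqb then 0 + ((l.takeWhile eqb).length : Int) else -1)
            = if r'.all eqb then 0 + ((t.length : Int)) else -1 := rfl
        rw [hred, hp, hs]
        by_cases hall : r'.all eqb = true
        · have hplr : prefZ l.reverse = r'.length := hiff.mpr hall
          rw [if_pos hall, if_pos (by omega)]
          omega
        · rw [if_neg hall, if_neg (fun hcond => hall (hiff.mp (by omega)))]
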